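-- pv_equiv track=rewrite | github.com/VishalDeoPrasad/InterviewBit | Special Index.py | solve
-- ===== SOURCE A (Python) =====
-- def solve(A):
--     even, odd = 0, 0
--     cnt = 0
--     for i in range(len(A)):
--         B = A.copy()
--         B.pop(i)
--         for j in range(len(B)):
--             if j % 2 == 0:
--                 even += B[j]
--             else:
--                 odd += B[j]
--         if even == odd:
--             cnt += 1
--         even = 0
--         odd = 0
--     return cnt
-- ===== SOURCE B (Python) =====
-- def solve(A):
--     te, to = 0, 0
--     for i, x in enumerate(A):
--         if i % 2 == 0:
--             te += x
--         else:
--             to += x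
--     le, lo, cnt = 0, 0, 0
--     for i, x in enumerate(A):
--         if i % 2 == 0:
--             te -= x
--         else:
--             to -= x
--         if le + to == lo + te:
--             cnt += 1
--         if i % 2 == 0:
--             le += x
--         else:
--             lo += x
--     return cnt
-- ===== Notes on version B (the rewrite author's own statement) =====
-- stated objective: faster
-- what changed: Replaces the O(n^2) rebuild-and-rescan (copy the list, pop index i, rescan it) with two O(n) passes maintaining prefix/suffix even- and odd-position sums, using that removal flips the parity of every later position.
import Mathlib
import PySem

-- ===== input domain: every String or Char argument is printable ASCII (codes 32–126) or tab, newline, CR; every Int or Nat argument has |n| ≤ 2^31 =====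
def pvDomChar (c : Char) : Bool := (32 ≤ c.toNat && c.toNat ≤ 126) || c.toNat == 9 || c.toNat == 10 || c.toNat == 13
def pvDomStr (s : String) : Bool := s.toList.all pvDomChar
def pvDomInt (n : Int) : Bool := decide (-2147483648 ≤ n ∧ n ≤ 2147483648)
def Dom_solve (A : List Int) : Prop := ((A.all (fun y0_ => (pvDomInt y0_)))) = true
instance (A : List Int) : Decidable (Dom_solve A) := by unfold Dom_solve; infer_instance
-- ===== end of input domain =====

-- B replaces A's O(n^2) copy/pop/rescan per index with two O(n) passes over prefix/suffix
-- even- and odd-position sums (removal flips the parity of every later position).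

-- ===== PORT A =====
-- inner loop 'for j in range(len(B)): if j % 2 == 0: even += B[j] else: odd += B[j]',
-- transcribed structurally: j walks the list, carrying (even, odd)
def solveInner : List Int → Nat → Int → Int → Int × Int
  | [], _, e, o => (e, o)
  | x :: xs, j, e, o =>
    if j % 2 = 0 then solveInner xs (j + 1) (e + x) o
    else solveInner xs (j + 1) e (o + x)

def solve (A : List Int) : Int :=
  (List.range A.length).foldl (fun cnt i =>
    -- B = A.copy(); B.pop(i)
    match PySem.List.pop? A (Int.ofNat i) with
    | none => cnt  -- unreachable: i < len(A)
    | some (_, B) =>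
      let eo := solveInner B 0 0 0
      if eo.1 = eo.2 then cnt + 1 else cnt) 0

-- ===== PORT B =====
-- first pass of Source B: total even-/odd-position sums
def altTot : List Int → Nat → Int → Int → Int × Int
  | [], _, ev, od => (ev, od)
  | x :: xs, i, ev, od =>
    if i % 2 = 0 then altTot xs (i + 1) (ev + x) od
    else altTot xs (i + 1) ev (od + x)

-- second pass of Source B: le/lo prefix sums, ev/od remaining suffix sums, cnt
def altLoop : List Int → Nat → Int → Int → Int → Int → Int → Int
  | [], _, _, _, _, _, cnt => cnt
  | x :: xs, i, le, lo, ev, od, cnt =>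
    let ev' := if i % 2 = 0 then ev - x else ev
    let od' := if i % 2 = 0 then od else od - x
    let cnt' := if le + od' = lo + ev' then cnt + 1 else cnt
    if i % 2 = 0 then altLoop xs (i + 1) (le + x) lo ev' od' cnt'
    else altLoop xs (i + 1) le (lo + x) ev' od' cnt'

def solve_alt (A : List Int) : Int :=
  let tt := altTot A 0 0 0
  altLoop A 0 0 0 tt.1 tt.2 0

-- ===== PRECONDITION & SPEC =====
def Spec_solve (A : List Int) (out : Int) : Prop := out = solve_alt A
instance (A : List Int) (out : Int) : Decidable (Spec_solve A out) := by unfold Spec_solve; infer_instance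

-- ===== CLAIM (what is proved, stated in full; the proofs are below) =====
def Claim_equal_solve : Prop := ∀ (A : List Int), Dom_solve A → Spec_solve A (solve A)

-- ===== LEMMAS AND PROOFS =====

-- sum of the elements at positions the alternating flag marks (flag b: head counted iff b)
def psum : Bool → List Int → Int
  | _, [] => 0
  | b, x :: xs => (if b then x else 0) + psum (!b) xs

theorem parity_succ (j : Nat) : (decide ((j + 1) % 2 = 0)) = !(decide (j % 2 = 0)) := by
  rcases Nat.mod_two_eq_zero_or_one j with h | h <;> simp [Nat.add_mod, h]

theorem solveInner_eq (xs : List Int) : ∀ (j : Nat) (e o : Int),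
    solveInner xs j e o = (e + psum (decide (j % 2 = 0)) xs, o + psum (!decide (j % 2 = 0)) xs) := by
  induction xs with
  | nil => intro j e o; simp [solveInner, psum]
  | cons x t ih =>
    intro j e o
    by_cases h : j % 2 = 0 <;>
      simp [solveInner, h, ih (j + 1), parity_succ, psum, add_assoc]

theorem altTot_eq (xs : List Int) : ∀ (i : Nat) (ev od : Int),
    altTot xs i ev od = (ev + psum (decide (i % 2 = 0)) xs, od + psum (!decide (i % 2 = 0)) xs) := by
  induction xs with
  | nil => intro i ev od; simp [altTot, psum]
  | cons x t ih =>
    intro i ev od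
    by_cases h : i % 2 = 0 <;>
      simp [altTot, h, ih (i + 1), parity_succ, psum, add_assoc]

-- the per-index counting both loops compute, in recursive form
def F : Bool → Int → Int → List Int → Int
  | _, _, _, [] => 0
  | b, le, lo, x :: xs =>
    (if le + psum b xs = lo + psum (!b) xs then 1 else 0)
    + (if b then F (!b) (le + x) lo xs else F (!b) le (lo + x) xs)

theorem altLoop_eq (xs : List Int) : ∀ (i : Nat) (le lo cnt : Int),
    altLoop xs i le lo (psum (decide (i % 2 = 0)) xs) (psum (!decide (i % 2 = 0)) xs) cnt
      = cnt + F (decide (i % 2 = 0)) le lo xs := by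
  induction xs with
  | nil => intro i le lo cnt; simp [altLoop, F]
  | cons x t ih =>
    intro i le lo cnt
    have hp := parity_succ i
    by_cases h : i % 2 = 0
    · have h1 : x + psum false t - x = psum false t := by ring
      have ih' := ih (i + 1) (le + x) lo
      rw [hp] at ih'
      simp only [h, decide_true, Bool.not_true, Bool.not_false] at ih' ⊢
      simp only [altLoop, psum, h, if_true, Bool.not_true, Bool.not_false,
        Bool.false_eq_true, if_false, zero_add, h1]
      rw [ih']
      simp only [F, Bool.not_false]
      by_cases hc : le + psum true t = lo + psum false t <;> simp [hc] <;> ring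
    · have h1 : x + psum false t - x = psum false t := by ring
      have ih' := ih (i + 1) le (lo + x)
      rw [hp] at ih'
      simp only [h, decide_false, Bool.not_false, Bool.not_true] at ih' ⊢
      simp only [altLoop, psum, h, Bool.not_false, Bool.not_true,
        Bool.false_eq_true, if_false, zero_add, h1, if_true]
      rw [ih']
      simp only [F, Bool.not_true]
      by_cases hc : le + psum false t = lo + psum true t <;> simp [hc, add_assoc]

theorem solve_alt_eq (A : List Int) : solve_alt A = F true 0 0 A := by
  have h := altLoop_eq A 0 0 0 0
  simp only [Nat.zero_mod, decide_true, Bool.not_true] at h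
  simp [solve_alt, altTot_eq, h]

theorem foldl_count_shift {α : Type} (l : List α) (P : α → Prop) [DecidablePred P] :
    ∀ (c : Int), l.foldl (fun c i => if P i then c + 1 else c) c
      = c + l.foldl (fun c i => if P i then c + 1 else c) 0 := by
  induction l with
  | nil => intro c; simp
  | cons x t ih =>
    intro c
    by_cases h : P x
    · simp only [List.foldl_cons, h, if_true]
      rw [ih (c + 1), ih (0 + 1)]; ring
    · simp [List.foldl_cons, h, ih c]

theorem F_eq_count (xs : List Int) : ∀ (b : Bool) (le lo : Int),
    F b le lo xs = (List.range xs.length).foldl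
      (fun c i => if le + psum b (xs.eraseIdx i) = lo + psum (!b) (xs.eraseIdx i) then c + 1 else c) 0 := by
  induction xs with
  | nil => intro b le lo; simp [F]
  | cons x t ih =>
    intro b le lo
    rw [List.length_cons, List.range_succ_eq_map, List.foldl_cons, List.foldl_map]
    have hstep : (fun (c : Int) (i : Nat) =>
          if le + psum b ((x :: t).eraseIdx (i + 1)) = lo + psum (!b) ((x :: t).eraseIdx (i + 1))
          then c + 1 else c)
        = (fun (c : Int) (i : Nat) =>
          if (le + if b then x else 0) + psum (!b) (t.eraseIdx i)
              = (lo + if !b then x else 0) + psum b (t.eraseIdx i)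
          then c + 1 else c) := by
      funext c i
      simp only [List.eraseIdx_cons_succ, psum, Bool.not_not]
      exact if_congr (by constructor <;> intro hh <;> linarith [hh]) rfl rfl
    have ih' := ih (!b) (le + if b then x else 0) (lo + if !b then x else 0)
    rw [Bool.not_not] at ih'
    rw [hstep, foldl_count_shift, ← ih']
    simp only [List.eraseIdx_cons_zero]
    cases b
    · simp only [F, Bool.not_false]
      by_cases hc : le + psum false t = lo + psum true t <;> simp [hc]
    · simp only [F, Bool.not_true]
      by_cases hc : le + psum true t = lo + psum false t <;> simp [hc]

theorem solve_eq_count (A : List Int) :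
    solve A = (List.range A.length).foldl
      (fun c i => if (0:Int) + psum true (A.eraseIdx i) = 0 + psum (!true) (A.eraseIdx i) then c + 1 else c) 0 := by
  unfold solve
  apply PySem.List.foldl_congr_mem
  intro cnt i hi
  have hlt : i < A.length := List.mem_range.mp hi
  simp only [show (Int.ofNat i) = (i : Int) from rfl, PySem.List.pop?_natCast A i hlt]
  simp only [solveInner_eq, Nat.zero_mod, decide_true]

-- ===== VERDICT (by name: the statement is the Claim_ definition above) =====
theorem solve_spec : Claim_equal_solve := by
  intro A _
  unfold Spec_solve
  rw [solve_eq_count, solve_alt_eq, F_eq_count]
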